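-- pv_equiv track=rewrite | github.com/ghesio/AortaSegmentator | utils/misc.py | remove_everything_after_last
-- ===== SOURCE A (Python) =====
-- def remove_everything_after_last(haystack, needle='/', n=1):
--     """
--     Remove everything after the n instance of a char in a string
--     :param haystack: the input string
--     :param needle: what to search
--     :param n: 1 last instance, 2 second-to-last, ecc.
--     :return: the manipulated string
--     """
--     while n > 0:
--         idx = haystack.rfind(needle)
--         if idx >= 0:
--             haystack = haystack[:idx]
--             n -= 1
--         else:
--             break
--     return haystack
-- ===== SOURCE B (Python) =====
-- def remove_everything_after_last(haystack, needle='/', n=1):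
--     if n <= 0 or needle == '':
--         return haystack
--     return haystack.rsplit(needle, n)[0]
-- ===== Notes on version B (the rewrite author's own statement) =====
-- stated objective: simpler
-- what changed: The while-loop of up-to-n repeated rfind+slice passes is replaced by a single rsplit(needle, n) call taking the first piece, with guards for n<=0 and the empty needle.
import Mathlib
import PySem

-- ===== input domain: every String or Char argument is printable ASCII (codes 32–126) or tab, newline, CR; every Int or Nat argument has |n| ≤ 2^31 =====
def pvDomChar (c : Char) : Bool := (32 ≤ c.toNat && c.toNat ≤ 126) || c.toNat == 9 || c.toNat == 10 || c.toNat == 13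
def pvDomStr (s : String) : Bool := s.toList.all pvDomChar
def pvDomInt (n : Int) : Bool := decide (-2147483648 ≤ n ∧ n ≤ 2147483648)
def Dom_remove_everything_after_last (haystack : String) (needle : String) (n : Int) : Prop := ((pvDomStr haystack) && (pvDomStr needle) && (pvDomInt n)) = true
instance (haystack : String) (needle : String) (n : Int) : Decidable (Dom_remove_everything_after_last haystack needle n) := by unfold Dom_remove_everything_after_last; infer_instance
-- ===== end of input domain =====

-- B replaces A's while-loop of up-to-n repeated rfind+slice passes by one rsplit(needle, n)
-- call taking the first piece (guards for n<=0 and empty needle); objective: simpler.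

-- ===== PORT A =====
def remove_everything_after_last (haystack : String) (needle : String) (n : Int) : String :=
  if 0 < n then
    let idx := PySem.Str.rfind haystack needle
    if 0 ≤ idx then
      remove_everything_after_last (PySem.Str.slice haystack none (some idx)) needle (n - 1)
    else haystack
  else haystack
termination_by n.toNat
decreasing_by omega

-- ===== PORT B =====
-- hand port of str.rsplit(sep, maxsplit) for nonempty sep (exact: CPython splits at the
-- rightmost non-overlapping occurrences, at most `n` of them, right to left)
def pyRsplit (sep : List Char) (h : List Char) (n : Nat) : List (List Char) :=
  match n with
  | 0 => [h]
  | m + 1 =>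
    let idx := PySem.Chars.rfind h sep
    if 0 ≤ idx then pyRsplit sep (h.take idx.toNat) m ++ [h.drop (idx.toNat + sep.length)]
    else [h]

def remove_everything_after_last_alt (haystack : String) (needle : String) (n : Int) : String :=
  if n ≤ 0 then haystack
  else if needle = "" then haystack
  else String.ofList ((pyRsplit needle.toList haystack.toList n.toNat).headD [])

-- ===== PRECONDITION & SPEC =====
def Spec_remove_everything_after_last (haystack : String) (needle : String) (n : Int) (out : String) : Prop := out = remove_everything_after_last_alt haystack needle n
instance (haystack : String) (needle : String) (n : Int) (out : String) : Decidable (Spec_remove_everything_after_last haystack needle n out) := by unfold Spec_remove_everything_after_last; infer_instance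

-- ===== CLAIM (what is proved, stated in full; the proofs are below) =====
def Claim_equal_remove_everything_after_last : Prop := ∀ (haystack : String) (needle : String) (n : Int), Dom_remove_everything_after_last haystack needle n → Spec_remove_everything_after_last haystack needle n (remove_everything_after_last haystack needle n)

-- ===== LEMMAS AND PROOFS =====

theorem rfind_go_nil (s : List Char) : ∀ j : Nat, PySem.Chars.rfind.go s [] j = j
  | 0 => by simp [PySem.Chars.rfind.go]
  | j + 1 => by simp [PySem.Chars.rfind.go]

theorem rfind_nil (s : List Char) : PySem.Chars.rfind s [] = s.length := by
  simp [PySem.Chars.rfind, rfind_go_nil]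

theorem string_eq_of_toList_eq {a b : String} (h : a.toList = b.toList) : a = b := by
  have := congrArg String.ofList h
  simpa using this

theorem slice_to_toList (s : String) (b : Int) (hb : 0 ≤ b) :
    (PySem.Str.slice s none (some b)).toList = s.toList.take b.toNat := by
  simp [PySem.List.slice_to _ hb]

theorem A_empty_needle : ∀ (k : Nat) (n : Int), n.toNat = k → ∀ h : String,
    remove_everything_after_last h "" n = h := by
  intro k
  induction k with
  | zero =>
    intro n hn h
    rw [remove_everything_after_last]
    have : ¬ 0 < n := by omega
    simp [this]
  | succ k ih =>
    intro n hn h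
    rw [remove_everything_after_last]
    have h0 : 0 < n := by omega
    have hr : PySem.Str.rfind h "" = (h.toList.length : Int) := by
      simp [rfind_nil]
    have hs : PySem.Str.slice h none (some ((h.toList.length : Int))) = h := by
      apply string_eq_of_toList_eq
      rw [slice_to_toList _ _ (by positivity)]
      simp
    have hge : (0 : Int) ≤ (h.toList.length : Int) := by positivity
    simp only [h0, if_true, hr, hge, hs]
    exact ih (n - 1) (by omega) h

theorem pyRsplit_ne_nil (sep h : List Char) (n : Nat) : pyRsplit sep h n ≠ [] := by
  cases n with
  | zero => simp [pyRsplit]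
  | succ m => rw [pyRsplit]; split_ifs <;> simp

theorem headD_append_of_ne_nil {α : Type} (a b : List (List α)) (ha : a ≠ []) :
    (a ++ b).headD [] = a.headD [] := by
  cases a with
  | nil => exact absurd rfl ha
  | cons x xs => simp

theorem main_pos : ∀ (k : Nat) (h s : String), s ≠ "" →
    remove_everything_after_last h s ((k : Int) + 1)
      = String.ofList ((pyRsplit s.toList h.toList (k + 1)).headD []) := by
  intro k
  induction k with
  | zero =>
    intro h s _
    rw [remove_everything_after_last]
    conv_rhs => rw [pyRsplit]
    have h0 : (0:Int) < ((0:Nat):Int) + 1 := by omega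
    by_cases hidx : 0 ≤ PySem.Str.rfind h s
    · have hidx' : 0 ≤ PySem.Chars.rfind h.toList s.toList := by simpa using hidx
      simp only [h0, if_true, hidx, hidx', if_true]
      rw [remove_everything_after_last]
      have h1 : ¬ (0:Int) < ((0:Nat):Int) + 1 - 1 := by omega
      simp only [h1, if_false]
      rw [headD_append_of_ne_nil _ _ (pyRsplit_ne_nil _ _ _)]
      apply string_eq_of_toList_eq
      rw [slice_to_toList _ _ hidx]
      simp [pyRsplit]
    · have hidx' : ¬ 0 ≤ PySem.Chars.rfind h.toList s.toList := by simpa using hidx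
      simp only [h0, if_true, hidx, hidx', if_false]
      apply string_eq_of_toList_eq
      simp
  | succ k ih =>
    intro h s hs
    rw [remove_everything_after_last]
    conv_rhs => rw [pyRsplit]
    have h0 : (0:Int) < (((k+1:Nat)):Int) + 1 := by positivity
    by_cases hidx : 0 ≤ PySem.Str.rfind h s
    · have hidx' : 0 ≤ PySem.Chars.rfind h.toList s.toList := by simpa using hidx
      simp only [h0, if_true, hidx, hidx', if_true]
      rw [headD_append_of_ne_nil _ _ (pyRsplit_ne_nil _ _ _)]
      have harg : (((k+1:Nat)):Int) + 1 - 1 = ((k:Nat):Int) + 1 := by push_cast; ring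
      have hsl : (PySem.Str.slice h none (some (PySem.Str.rfind h s))).toList
          = h.toList.take (PySem.Chars.rfind h.toList s.toList).toNat := by
        rw [slice_to_toList _ _ hidx]; simp
      rw [harg, ih _ s hs, hsl]
    · have hidx' : ¬ 0 ≤ PySem.Chars.rfind h.toList s.toList := by simpa using hidx
      simp only [h0, if_true, hidx, hidx', if_false]
      apply string_eq_of_toList_eq
      simp

-- ===== VERDICT (by name: the statement is the Claim_ definition above) =====
theorem remove_everything_after_last_spec : Claim_equal_remove_everything_after_last := by
  intro h s n _
  show remove_everything_after_last h s n = remove_everything_after_last_alt h s n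
  rw [remove_everything_after_last_alt]
  by_cases hn : n ≤ 0
  · rw [if_pos hn, remove_everything_after_last]
    simp [show ¬ 0 < n by omega]
  · rw [if_neg hn]
    by_cases hs : s = ""
    · rw [if_pos hs, hs]
      exact A_empty_needle n.toNat n rfl h
    · rw [if_neg hs]
      have hk : n = ((n.toNat - 1 : Nat) : Int) + 1 := by omega
      have hk2 : n.toNat = (n.toNat - 1) + 1 := by omega
      rw [hk2]
      calc remove_everything_after_last h s n
          = remove_everything_after_last h s (((n.toNat - 1 : Nat) : Int) + 1) := by rw [← hk]
        _ = _ := main_pos _ h s hs
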